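-- pv_equiv track=rewrite | github.com/alonana/top | python/2020/swap_the_string.py | generate
-- ===== SOURCE A (Python) =====
-- def generate(p, a0, n, x, y):
--     a = [a0]
--     for i in range(1, n):
--         curr = a[i - 1] * x + y
--         a.append(curr % 1812447359)
--
--     s = p
--     for i in range(len(p), n):
--         c = a[i] % 26 + ord('a')
--         s = s[:i] + chr(c) + s[i + 1:]
--
--     return s
-- ===== SOURCE B (Python) =====
-- def generate(p, a0, n, x, y):
--     chars = list(p)
--     cur = a0
--     for i in range(n):
--         if i >= len(p):
--             chars.append(chr(cur % 26 + ord('a')))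
--         cur = (cur * x + y) % 1812447359
--     return ''.join(chars)
-- ===== Notes on version B (the rewrite author's own statement) =====
-- stated objective: simpler
-- what changed: B fuses the two passes into one streaming loop: instead of materialising the full recurrence list and then rewriting the string by repeated slicing (s[:i]+chr+s[i+1:]), it keeps one rolling recurrence value and appends each emitted character to a char list, joined once at the end.
import Mathlib
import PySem

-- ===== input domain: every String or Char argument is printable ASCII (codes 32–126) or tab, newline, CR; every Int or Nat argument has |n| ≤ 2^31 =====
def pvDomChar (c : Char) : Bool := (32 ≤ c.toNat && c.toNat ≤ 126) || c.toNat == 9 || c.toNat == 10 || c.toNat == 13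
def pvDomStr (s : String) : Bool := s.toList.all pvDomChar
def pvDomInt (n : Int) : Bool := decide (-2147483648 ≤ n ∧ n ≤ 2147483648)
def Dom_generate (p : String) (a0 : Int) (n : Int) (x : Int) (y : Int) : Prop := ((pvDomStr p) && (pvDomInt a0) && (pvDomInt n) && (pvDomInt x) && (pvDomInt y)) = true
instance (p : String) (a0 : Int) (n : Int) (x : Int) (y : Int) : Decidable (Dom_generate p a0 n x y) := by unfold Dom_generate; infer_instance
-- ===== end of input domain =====

-- B fuses A's two passes (build the full recurrence list, then rewrite the string by repeated
-- slicing) into one streaming loop over a rolling recurrence value, appending emitted characters.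

-- ===== PORT A =====
-- strings are modelled as their List Char contents (PySem.Chars convention);
-- a[i-1] / a[i] are always in range in A, ported with pyGetD (default never used).
def generate (p : String) (a0 : Int) (n : Int) (x : Int) (y : Int) : String :=
  let a := (PySem.List.pyRange 1 n 1).foldl
    (fun a i =>
      let curr := (PySem.List.pyGetD a (i - 1) 0) * x + y
      a ++ [PySem.Int.mod curr 1812447359]) [a0]
  let s := (PySem.List.pyRange (PySem.Str.len p) n 1).foldl
    (fun s i =>
      let c := PySem.Int.mod (PySem.List.pyGetD a i 0) 26 + 97
      PySem.List.slice s none (some i) ++ [Char.ofNat c.toNat]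
        ++ PySem.List.slice s (some (i + 1)) none) p.toList
  String.ofList s

-- ===== PORT B =====
def generate_alt (p : String) (a0 : Int) (n : Int) (x : Int) (y : Int) : String :=
  let st := (PySem.List.pyRange 0 n 1).foldl
    (fun (st : List Char × Int) i =>
      let chars := if PySem.Str.len p ≤ i
        then st.1 ++ [Char.ofNat (PySem.Int.mod st.2 26 + 97).toNat]
        else st.1
      (chars, PySem.Int.mod (st.2 * x + y) 1812447359))
    (p.toList, a0)
  String.ofList st.1

-- ===== PRECONDITION & SPEC =====
def Spec_generate (p : String) (a0 : Int) (n : Int) (x : Int) (y : Int) (out : String) : Prop := out = generate_alt p a0 n x y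
instance (p : String) (a0 : Int) (n : Int) (x : Int) (y : Int) (out : String) : Decidable (Spec_generate p a0 n x y out) := by unfold Spec_generate; infer_instance

-- ===== CLAIM (what is proved, stated in full; the proofs are below) =====
def Claim_equal_generate : Prop := ∀ (p : String) (a0 : Int) (n : Int) (x : Int) (y : Int), Dom_generate p a0 n x y → Spec_generate p a0 n x y (generate p a0 n x y)

-- ===== LEMMAS AND PROOFS =====

-- the recurrence value after k updates
def pvSeq (a0 x y : Int) : Nat → Int
  | 0 => a0
  | k + 1 => PySem.Int.mod (pvSeq a0 x y k * x + y) 1812447359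

-- the character emitted for recurrence value c
def pvCh (c : Int) : Char := Char.ofNat (PySem.Int.mod c 26 + 97).toNat

-- A's first loop builds exactly the map of pvSeq over an initial segment
theorem pvA_list (a0 x y : Int) (m : Nat) :
    ((List.range m).map (fun k : Nat => (1 : Int) + (k : Int))).foldl
      (fun a i => a ++ [PySem.Int.mod ((PySem.List.pyGetD a (i - 1) 0) * x + y) 1812447359])
      [a0]
    = (List.range (m + 1)).map (pvSeq a0 x y) := by
  induction m with
  | zero => simp [pvSeq]
  | succ m ih =>
    rw [List.range_succ (n := m), List.map_append, List.foldl_append, ih]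
    have h1 : ((1 : Int) + (m : Int)) - 1 = ((m : Int)) := by ring
    simp only [List.map_cons, List.map_nil, List.foldl_cons, List.foldl_nil, h1, PySem.List.pyGetD_natCast]
    have hget : ((List.range (m + 1)).map (pvSeq a0 x y)).getD m 0 = pvSeq a0 x y m := by
      have hm : m < ((List.range (m + 1)).map (pvSeq a0 x y)).length := by simp
      rw [List.getD_eq_getElem _ _ hm]
      simp
    rw [hget, List.range_succ (n := m + 1), List.map_append]
    simp [pvSeq]

-- A's second loop appends the emitted characters one by one
theorem pvA_str (a : List Int) (f : Nat → Int)
    (ha : ∀ k : Nat, k < a.length → a.getD k 0 = f k)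
    (L j : Nat) (hj : L + j ≤ a.length) (s : List Char) (hs : s.length = L) :
    ((List.range j).map (fun k : Nat => ((L : Int)) + (k : Int))).foldl
      (fun s i => PySem.List.slice s none (some i)
        ++ [Char.ofNat (PySem.Int.mod (PySem.List.pyGetD a i 0) 26 + 97).toNat]
        ++ PySem.List.slice s (some (i + 1)) none) s
    = s ++ (List.range j).map (fun t => pvCh (f (L + t))) := by
  induction j generalizing s with
  | zero => simp
  | succ j ih =>
    rw [List.range_succ (n := j), List.map_append, List.foldl_append]
    have hlen : (s ++ (List.range j).map (fun t => pvCh (f (L + t)))).length = L + j := by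
      simp [hs]
    have hrec := ih (by omega) s hs
    rw [hrec]
    simp only [List.map_cons, List.map_nil, List.foldl_cons, List.foldl_nil]
    set t := s ++ (List.range j).map (fun t => pvCh (f (L + t))) with ht
    have hcast : ((L : Int)) + ((j : Int)) = (((L + j : Nat) : Int)) := by push_cast; ring
    have hslice1 : PySem.List.slice t none (some ((L : Int) + (j : Int))) = t := by
      rw [hcast, PySem.List.slice_to_natCast]
      exact List.take_of_length_le (by omega)
    have hslice2 : PySem.List.slice t (some ((L : Int) + (j : Int) + 1)) none = [] := by
      have : ((L : Int)) + ((j : Int)) + 1 = (((L + j + 1 : Nat) : Int)) := by push_cast; ring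
      rw [this, PySem.List.slice_from_natCast]
      exact List.drop_eq_nil_of_le (by omega)
    have hget : PySem.List.pyGetD a ((L : Int) + (j : Int)) 0 = f (L + j) := by
      rw [hcast, PySem.List.pyGetD_natCast]
      exact ha (L + j) (by omega)
    rw [hslice1, hslice2, hget]
    simp [ht, pvCh, List.append_assoc]

-- B's loop invariant: after the first j steps the state is the emitted prefix and pvSeq j
-- (c abstracts the ite condition's left side so the lemma matches the port syntactically)
theorem pvB_loop (pl : List Char) (a0 x y c : Int) (j : Nat) (hc : c = ((pl.length : Nat) : Int)) :
    ((List.range j).map (fun k : Nat => (0 : Int) + (k : Int))).foldl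
      (fun (st : List Char × Int) i =>
        (if c ≤ i
          then st.1 ++ [Char.ofNat (PySem.Int.mod st.2 26 + 97).toNat]
          else st.1,
         PySem.Int.mod (st.2 * x + y) 1812447359))
      (pl, a0)
    = (pl ++ (List.range (j - pl.length)).map (fun t => pvCh (pvSeq a0 x y (pl.length + t))),
       pvSeq a0 x y j) := by
  induction j with
  | zero => simp [pvSeq]
  | succ j ih =>
    rw [List.range_succ (n := j), List.map_append, List.foldl_append, ih]
    simp only [List.map_cons, List.map_nil, List.foldl_cons, List.foldl_nil]
    by_cases h : pl.length ≤ j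
    · have hcond : c ≤ (0 : Int) + (j : Int) := by rw [hc]; omega
      rw [if_pos hcond]
      have hsub : j + 1 - pl.length = (j - pl.length) + 1 := by omega
      have hidx : pl.length + (j - pl.length) = j := by omega
      rw [hsub]
      simp [List.range_succ, pvSeq, pvCh, hidx]
    · have hcond : ¬ c ≤ (0 : Int) + (j : Int) := by rw [hc]; omega
      rw [if_neg hcond]
      have : j + 1 - pl.length = j - pl.length := by omega
      rw [this]
      simp [pvSeq]

-- B's whole loop, stated on the port's own terms
theorem pvB_main (p : String) (a0 n x y : Int) :
    ((PySem.List.pyRange 0 n 1).foldl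
      (fun (st : List Char × Int) i =>
        (if PySem.Str.len p ≤ i
          then st.1 ++ [Char.ofNat (PySem.Int.mod st.2 26 + 97).toNat]
          else st.1,
         PySem.Int.mod (st.2 * x + y) 1812447359))
      (p.toList, a0)).1
    = p.toList ++ (List.range (n.toNat - p.toList.length)).map
        (fun t => pvCh (pvSeq a0 x y (p.toList.length + t))) := by
  have h := pvB_loop p.toList a0 x y (PySem.Str.len p) (n - 0).toNat (PySem.Str.len_eq p)
  rw [PySem.List.pyRange_one, h]
  norm_num

-- ===== VERDICT (by name: the statement is the Claim_ definition above) =====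
theorem generate_spec : Claim_equal_generate := by
  intro p a0 n x y _
  simp only [Spec_generate, generate, generate_alt]
  rw [pvB_main]
  simp only [PySem.List.pyRange_one, PySem.Str.len_eq]
  set L := p.toList.length with hL
  rw [pvA_list]
  by_cases hn : n ≤ (L : Int)
  · -- second loop of A is empty; B emits nothing
    have h1 : ((n : Int) - (L : Int)).toNat = 0 := by omega
    have h2 : n.toNat - L = 0 := by omega
    rw [h1, h2]
    simp
  · -- n > L ≥ 0
    have hA := pvA_str ((List.range ((n - 1).toNat + 1)).map (pvSeq a0 x y)) (pvSeq a0 x y)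
      (by
        intro k hk
        simp only [List.length_map, List.length_range] at hk
        rw [List.getD_eq_getElem _ _ (by simp only [List.length_map, List.length_range]; omega)]
        simp)
      L ((n : Int) - (L : Int)).toNat
      (by simp only [List.length_map, List.length_range]; omega)
      p.toList hL.symm
    rw [hA]
    have : n.toNat - L = ((n : Int) - (L : Int)).toNat := by omega
    rw [this]
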